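-- pv_equiv track=rewrite | github.com/IvanHahan/lab_checker | lab_checker/doc_parsing.py | _cluster_shapes_by_proximity
-- ===== SOURCE A (Python) =====
-- from typing import Dict, List, Optional, Tuple
--
-- DIAGRAM_DETECTION_THRESHOLD = 3  # Minimum shapes to consider as diagram
--
-- DIAGRAM_CLUSTERING_DISTANCE = 50  # Vertical distance for grouping shapes
--
-- def _cluster_shapes_by_proximity(shapes: List[Dict]) -> List[List[Dict]]:
--     """
--     Group shapes that are close together vertically to identify diagrams.
--
--     Args:
--         shapes: List of shape dictionaries
--
--     Returns:
--         List of shape clusters (each cluster is a list of shapes)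
--     """
--     if not shapes:
--         return []
--
--     # Sort by vertical position
--     sorted_shapes = sorted(shapes, key=lambda x: x["y"])
--
--     clusters = []
--     current_cluster = [sorted_shapes[0]]
--
--     for shape in sorted_shapes[1:]:
--         if abs(shape["y"] - current_cluster[-1]["y"]) < DIAGRAM_CLUSTERING_DISTANCE:
--             current_cluster.append(shape)
--         else:
--             if len(current_cluster) >= DIAGRAM_DETECTION_THRESHOLD:
--                 clusters.append(current_cluster)
--             current_cluster = [shape]
--
--     # Don't forget the last cluster
--     if len(current_cluster) >= DIAGRAM_DETECTION_THRESHOLD: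
--         clusters.append(current_cluster)
--
--     return clusters
-- ===== SOURCE B (Python) =====
-- DIAGRAM_DETECTION_THRESHOLD = 3  # Minimum shapes to consider as diagram
--
-- DIAGRAM_CLUSTERING_DISTANCE = 50  # Vertical distance for grouping shapes
--
--
-- def _first_gap(s):
--     """Index of the first adjacent pair in s whose vertical gap is large, else None."""
--     for i, (a, b) in enumerate(zip(s, s[1:])):
--         if abs(b["y"] - a["y"]) >= DIAGRAM_CLUSTERING_DISTANCE:
--             return i + 1
--     return None
--
--
-- def _split_on_gaps(s):
--     """Recursively split s at its first large gap into contiguous segments."""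
--     if not s:
--         return []
--     i = _first_gap(s)
--     if i is None:
--         return [s]
--     return [s[:i]] + _split_on_gaps(s[i:])
--
--
-- def _cluster_shapes_by_proximity(shapes):
--     sorted_shapes = sorted(shapes, key=lambda x: x["y"])
--     return [c for c in _split_on_gaps(sorted_shapes)
--             if len(c) >= DIAGRAM_DETECTION_THRESHOLD]
-- ===== Notes on version B (the rewrite author's own statement) =====
-- stated objective: alternative
-- what changed: Replaces A's incremental grow-or-flush accumulator loop (with inline threshold checks on every flush) by a two-phase structure: recursively split the sorted list at its first large vertical gap into contiguous segments, then filter segments by the size threshold in one final pass.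
import Mathlib
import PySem

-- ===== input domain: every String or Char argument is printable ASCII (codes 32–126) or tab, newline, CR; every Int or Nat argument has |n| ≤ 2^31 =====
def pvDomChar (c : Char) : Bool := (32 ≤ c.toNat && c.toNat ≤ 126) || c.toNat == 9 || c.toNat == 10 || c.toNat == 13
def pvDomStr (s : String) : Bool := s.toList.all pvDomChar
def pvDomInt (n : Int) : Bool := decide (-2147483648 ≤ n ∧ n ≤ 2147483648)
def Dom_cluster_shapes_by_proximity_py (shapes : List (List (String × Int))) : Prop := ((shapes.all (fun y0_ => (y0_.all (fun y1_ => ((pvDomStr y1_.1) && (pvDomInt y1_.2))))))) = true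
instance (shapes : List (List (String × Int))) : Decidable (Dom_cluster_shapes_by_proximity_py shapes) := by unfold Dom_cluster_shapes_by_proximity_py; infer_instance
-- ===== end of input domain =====

-- B is an alternative decomposition (recursive split of the sorted list at its first large
-- gap, then one final length filter) of A's incremental grow-or-flush clustering loop;
-- equivalence of the RETURN value is proved on inputs where every shape has a "y" key.

-- ===== PORT A =====
-- shared lookup x["y"]: first match in the association list (value irrelevant under Pre_)
def pvY (s : List (String × Int)) : Int :=
  (((s.find? (fun kv => kv.1 == "y")).map Prod.snd).getD 0)

-- A's loop body: grow current cluster, or flush it (if big enough) and start a new one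
def pvStepA (acc : List (List (List (String × Int))) × List (List (String × Int)))
    (shape : List (String × Int)) :
    List (List (List (String × Int))) × List (List (String × Int)) :=
  if |pvY shape - pvY (PySem.List.pyGetD acc.2 (-1) [])| < 50 then
    (acc.1, acc.2 ++ [shape])
  else
    ((if 3 ≤ acc.2.length then acc.1 ++ [acc.2] else acc.1), [shape])

def cluster_shapes_by_proximity_py (shapes : List (List (String × Int))) : List (List (List (String × Int))) :=
  if shapes.isEmpty then []
  else
    let sorted_shapes := PySem.List.sorted shapes pvY
    let first := PySem.List.pyGetD sorted_shapes 0 []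
    let st := (PySem.List.slice sorted_shapes (some 1) none).foldl pvStepA ([], [first])
    if 3 ≤ st.2.length then st.1 ++ [st.2] else st.1

-- ===== PORT B =====
-- _first_gap: index of the first adjacent pair with a large vertical gap, else none
def pvFirstGap (s : List (List (String × Int))) : Option Int :=
  ((PySem.List.enumerate (s.zip (PySem.List.slice s (some 1) none)) 0).find?
      (fun p => decide (50 ≤ |pvY p.2.2 - pvY p.2.1|))).map (fun p => p.1 + 1)

-- bound needed for termination of the recursive split (cited by decreasing_by)
theorem pvFirstGap_bounds {s : List (List (String × Int))} {i : Int}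
    (h : pvFirstGap s = some i) : 1 ≤ i ∧ i.toNat < s.length ∧ 1 ≤ i.toNat := by
  unfold pvFirstGap at h
  rw [PySem.List.slice_from_one] at h
  rcases Option.map_eq_some_iff.mp h with ⟨p, hp, hip⟩
  have hmem := List.mem_of_find?_eq_some hp
  rcases (PySem.List.mem_enumerate_iff _ _ _).mp hmem with ⟨k, hk, hpk⟩
  have hlen : (s.zip s.tail).length = min s.length s.tail.length := List.length_zip ..
  have htail : s.tail.length = s.length - 1 := by simp
  subst hpk hip
  simp only [zero_add]
  omega

-- _split_on_gaps: recursively split s at its first large gap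
def pvSplitGaps (s : List (List (String × Int))) : List (List (List (String × Int))) :=
  if s.isEmpty then []
  else
    match h : pvFirstGap s with
    | none => [s]
    | some i =>
        PySem.List.slice s none (some i) :: pvSplitGaps (PySem.List.slice s (some i) none)
termination_by s.length
decreasing_by
  have hb := pvFirstGap_bounds h
  rw [PySem.List.slice_from _ (by omega : (0:Int) ≤ i)]
  simp only [List.length_drop]
  omega

def cluster_shapes_by_proximity_py_alt (shapes : List (List (String × Int))) : List (List (List (String × Int))) :=
  (pvSplitGaps (PySem.List.sorted shapes pvY)).filter (fun c => decide (3 ≤ c.length))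

-- ===== PRECONDITION & SPEC =====
-- Pre_ excludes shapes without a "y" key, where Python's x["y"] raises KeyError (in both A and B).
def Pre_cluster_shapes_by_proximity_py (shapes : List (List (String × Int))) : Prop :=
  ∀ s ∈ shapes, s.any (fun kv => kv.1 == "y") = true
instance (shapes : List (List (String × Int))) : Decidable (Pre_cluster_shapes_by_proximity_py shapes) := by unfold Pre_cluster_shapes_by_proximity_py; infer_instance

def pvWitness_cluster_shapes_by_proximity_py : (List (List (String × Int))) :=
  [[("y", 0)], [("y", 10)], [("y", 20)], [("y", 200)]]

def Spec_cluster_shapes_by_proximity_py (shapes : List (List (String × Int))) (out : List (List (List (String × Int)))) : Prop := out = cluster_shapes_by_proximity_py_alt shapes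
instance (shapes : List (List (String × Int))) (out : List (List (List (String × Int)))) : Decidable (Spec_cluster_shapes_by_proximity_py shapes out) := by unfold Spec_cluster_shapes_by_proximity_py; infer_instance

-- ===== CLAIM (what is proved, stated in full; the proofs are below) =====
def Claim_equal_cluster_shapes_by_proximity_py : Prop := ∀ (shapes : List (List (String × Int))), Dom_cluster_shapes_by_proximity_py shapes → Pre_cluster_shapes_by_proximity_py shapes → Spec_cluster_shapes_by_proximity_py shapes (cluster_shapes_by_proximity_py shapes)

-- ===== LEMMAS AND PROOFS =====

-- reference segmentation: split a list into maximal runs of adjacent elements with small gaps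
def pvSegs : List (List (String × Int)) → List (List (List (String × Int)))
  | [] => []
  | [a] => [[a]]
  | a :: b :: t =>
      let r := pvSegs (b :: t)
      if 50 ≤ |pvY b - pvY a| then [a] :: r else (a :: r.headD []) :: r.tail

-- A's trailing flush of the current cluster
def pvFin (st : List (List (List (String × Int))) × List (List (String × Int))) :
    List (List (List (String × Int))) :=
  if 3 ≤ st.2.length then st.1 ++ [st.2] else st.1

theorem pvSegs_head (a : List (String × Int)) (t : List (List (String × Int))) :
    ∃ u r, pvSegs (a :: t) = (a :: u) :: r := by
  cases t with
  | nil => exact ⟨[], [], rfl⟩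
  | cons b t' =>
      simp only [pvSegs]
      split
      · exact ⟨[], pvSegs (b :: t'), rfl⟩
      · exact ⟨(pvSegs (b :: t')).headD [], (pvSegs (b :: t')).tail, rfl⟩

-- A's loop computes the length-filtered segments (generalised over accumulator state)
theorem pvLoopA (xs : List (List (String × Int)))
    (cs : List (List (List (String × Int)))) (pre : List (List (String × Int)))
    (a : List (String × Int)) :
    pvFin (xs.foldl pvStepA (cs, pre ++ [a])) =
      cs ++ ((pre ++ (pvSegs (a :: xs)).headD []) :: (pvSegs (a :: xs)).tail).filter
        (fun c => decide (3 ≤ c.length)) := by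
  induction xs generalizing cs pre a with
  | nil =>
      simp only [List.foldl_nil, pvSegs, List.headD_cons, List.tail_cons, pvFin,
        List.filter_cons, List.filter_nil, decide_eq_true_eq]
      split_ifs <;> simp
  | cons x xs' ih =>
      rw [List.foldl_cons]
      have hstep : pvStepA (cs, pre ++ [a]) x =
          if |pvY x - pvY a| < 50 then (cs, (pre ++ [a]) ++ [x])
          else ((if 3 ≤ (pre ++ [a]).length then cs ++ [pre ++ [a]] else cs), [x]) := by
        simp [pvStepA, PySem.List.pyGetD_neg_one_append_singleton]
      rw [hstep]
      by_cases hg : 50 ≤ |pvY x - pvY a|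
      · rw [if_neg (by omega)]
        have hsegs : pvSegs (a :: x :: xs') = [a] :: pvSegs (x :: xs') := by
          simp only [pvSegs]; rw [if_pos hg]
        have h2 := ih (if 3 ≤ (pre ++ [a]).length then cs ++ [pre ++ [a]] else cs) [] x
        simp only [List.nil_append] at h2
        rw [h2, hsegs]
        obtain ⟨u, r, hur⟩ := pvSegs_head x xs'
        rw [hur]
        simp only [List.headD_cons, List.tail_cons, List.filter_cons, decide_eq_true_eq]
        split_ifs <;> simp
      · rw [if_pos (by omega)]
        rw [ih]
        have hsegs : pvSegs (a :: x :: xs') =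
            (a :: (pvSegs (x :: xs')).headD []) :: (pvSegs (x :: xs')).tail := by
          simp only [pvSegs]; rw [if_neg hg]
        rw [hsegs]
        simp only [List.headD_cons, List.tail_cons]
        simp [List.append_assoc]

-- index-shift of enumerate under find? with an index-blind predicate
theorem pvFind?_enumerate_shift {α : Type} (pr : α → Bool) (L : List α) (s : Int) :
    (PySem.List.enumerate L (s + 1)).find? (fun p => pr p.2) =
      ((PySem.List.enumerate L s).find? (fun p => pr p.2)).map (fun p => (p.1 + 1, p.2)) := by
  induction L generalizing s with
  | nil => simp [PySem.List.enumerate_nil]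
  | cons x L' ih =>
      rw [PySem.List.enumerate_cons, PySem.List.enumerate_cons]
      by_cases h : pr x = true
      · rw [List.find?_cons_of_pos (by simpa using h), List.find?_cons_of_pos (by simpa using h)]
        simp
      · rw [List.find?_cons_of_neg (by simpa using h), List.find?_cons_of_neg (by simpa using h)]
        exact ih (s + 1)

-- structural recurrence for pvFirstGap
theorem pvFirstGap_nil : pvFirstGap [] = none := rfl

theorem pvFirstGap_single (a : List (String × Int)) : pvFirstGap [a] = none := rfl

theorem pvFirstGap_cons₂ (a b : List (String × Int)) (t : List (List (String × Int))) :
    pvFirstGap (a :: b :: t) =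
      if 50 ≤ |pvY b - pvY a| then some 1 else (pvFirstGap (b :: t)).map (· + 1) := by
  unfold pvFirstGap
  rw [PySem.List.slice_from_one, PySem.List.slice_from_one]
  simp only [List.tail_cons, List.zip_cons_cons, PySem.List.enumerate_cons, List.find?_cons]
  by_cases h : (50 ≤ |pvY b - pvY a|)
  · simp [h]
  · simp only [h, if_false]
    rw [show (0 : Int) + 1 = 0 + 1 from rfl,
      pvFind?_enumerate_shift (fun q => decide (50 ≤ |pvY q.2 - pvY q.1|)) (List.zip (b :: t) t) 0]
    cases ((PySem.List.enumerate (List.zip (b :: t) t) 0).find?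
        (fun p => decide (50 ≤ |pvY p.2.2 - pvY p.2.1|))) <;> simp

-- no gap anywhere: a single segment
theorem pvSegs_of_firstGap_none (l : List (List (String × Int))) (hne : l ≠ [])
    (h : pvFirstGap l = none) : pvSegs l = [l] := by
  induction l with
  | nil => exact absurd rfl hne
  | cons a t ih =>
      cases t with
      | nil => rfl
      | cons b t' =>
          rw [pvFirstGap_cons₂] at h
          by_cases hg : 50 ≤ |pvY b - pvY a|
          · rw [if_pos hg] at h; exact absurd h (by simp)
          · rw [if_neg hg] at h
            have hrec : pvFirstGap (b :: t') = none := by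
              cases hh : pvFirstGap (b :: t') <;> simp [hh] at h ⊢
            have hseg := ih (by simp) hrec
            simp only [pvSegs, hseg, if_neg hg, List.headD_cons, List.tail_cons]

-- a first gap at i splits pvSegs as take/drop there
theorem pvSegs_split_at_first (l : List (List (String × Int))) (i : Int)
    (h : pvFirstGap l = some i) :
    pvSegs l = l.take i.toNat :: pvSegs (l.drop i.toNat) := by
  induction l generalizing i with
  | nil => simp [pvFirstGap_nil] at h
  | cons a t ih =>
      cases t with
      | nil => simp [pvFirstGap_single] at h
      | cons b t' =>
          rw [pvFirstGap_cons₂] at h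
          by_cases hg : 50 ≤ |pvY b - pvY a|
          · rw [if_pos hg] at h
            have hi : i = 1 := by simpa using h.symm
            subst hi
            simp only [pvSegs, if_pos hg, Int.toNat_one, List.take_succ_cons,
              List.take_zero, List.drop_succ_cons, List.drop_zero]
          · rw [if_neg hg] at h
            rcases Option.map_eq_some_iff.mp h with ⟨j, hj, hij⟩
            have hb := pvFirstGap_bounds hj
            have hr := ih j hj
            have hit : i.toNat = j.toNat + 1 := by omega
            simp only [pvSegs, if_neg hg, hr, hit, List.take_succ_cons, List.drop_succ_cons,
              List.headD_cons, List.tail_cons]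

-- B's recursive split equals the reference segmentation
theorem pvSplitGaps_eq_segs (l : List (List (String × Int))) : pvSplitGaps l = pvSegs l := by
  induction l using pvSplitGaps.induct with
  | case1 l hl =>
      rw [List.isEmpty_iff] at hl
      subst hl
      simp [pvSplitGaps, pvSegs]
  | case2 l hl h =>
      rw [List.isEmpty_iff] at hl
      unfold pvSplitGaps
      rw [if_neg (by simpa [List.isEmpty_iff] using hl)]
      split
      · exact (pvSegs_of_firstGap_none l hl h).symm
      · rename_i j h'
        rw [h] at h'
        cases h'
  | case3 l hl i h ih =>
      unfold pvSplitGaps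
      rw [if_neg (by simp_all)]
      split
      · rename_i h'
        rw [h] at h'
        cases h'
      · rename_i j h'
        rw [h] at h'
        injection h' with hij
        subst hij
        have hb := pvFirstGap_bounds h
        rw [PySem.List.slice_to _ (by omega : (0:Int) ≤ i),
          PySem.List.slice_from _ (by omega : (0:Int) ≤ i)]
        rw [PySem.List.slice_from _ (by omega : (0:Int) ≤ i)] at ih
        rw [ih, pvSegs_split_at_first l i h]

-- ===== VERDICT (by name: the statement is the Claim_ definition above) =====
theorem cluster_shapes_by_proximity_py_spec : Claim_equal_cluster_shapes_by_proximity_py := by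
  intro shapes _ _
  unfold Spec_cluster_shapes_by_proximity_py
  unfold cluster_shapes_by_proximity_py cluster_shapes_by_proximity_py_alt
  by_cases hs : shapes = []
  · subst hs
    rw [if_pos (by rfl)]
    have h0 : PySem.List.sorted ([] : List (List (String × Int))) pvY = [] := by
      simp [PySem.List.sorted_eq_nil_iff]
    rw [h0]
    simp [pvSplitGaps]
  · rw [if_neg (by simpa [List.isEmpty_iff] using hs)]
    have hne : PySem.List.sorted shapes pvY ≠ [] := by
      simp [PySem.List.sorted_eq_nil_iff, hs]
    obtain ⟨b, bs, hss⟩ := List.exists_cons_of_ne_nil hne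
    show pvFin ((PySem.List.slice (PySem.List.sorted shapes pvY) (some 1) none).foldl pvStepA
        ([], [PySem.List.pyGetD (PySem.List.sorted shapes pvY) 0 []])) = _
    rw [pvSplitGaps_eq_segs, hss, PySem.List.slice_from_one]
    simp only [List.tail_cons, PySem.List.pyGetD_zero_cons]
    have hl := pvLoopA bs [] [] b
    simp only [List.nil_append] at hl
    rw [hl]
    obtain ⟨u, r, hur⟩ := pvSegs_head b bs
    rw [hur]
    simp
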